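-- pv_equiv track=rewrite | github.com/koii-network/prometheus-beta | src/shannon_fano_coding.py | shannon_fano_decode
-- ===== SOURCE A (Python) =====
-- from typing import List, Dict, Tuple
--
-- def shannon_fano_decode(codes: Dict[str, str], encoded_data: str) -> str:
--     """
--     Decode data using Shannon-Fano codes.
--
--     :param codes: Dictionary of symbol to code mappings
--     :param encoded_data: Encoded binary string
--     :return: Decoded original string
--     """
--     # Create reverse mapping of codes to symbols
--     reverse_codes = {code: symbol for symbol, code in codes.items()}
--
--     decoded_data = []
--     current_code = ''
--
--     for bit in encoded_data:
--         current_code += bit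
--         if current_code in reverse_codes:
--             decoded_data.append(reverse_codes[current_code])
--             current_code = ''
--
--     if current_code:
--         raise ValueError("Invalid encoded data: incomplete code")
--
--     return ''.join(decoded_data)
-- ===== SOURCE B (Python) =====
-- class _Node:
--     __slots__ = ("symbol", "children")
--     def __init__(self):
--         self.symbol = None
--         self.children = {}
--
--
-- def shannon_fano_decode(codes, encoded_data):
--     """Decode via a code trie: one pointer walk per bit instead of growing a
--     current_code string and hashing it at every bit."""
--     root = _Node()
--     for symbol, code in codes.items():
--         node = root
--         for ch in code:
--             node = node.children.setdefault(ch, _Node())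
--         node.symbol = symbol
--
--     out = []
--     i, n = 0, len(encoded_data)
--     while i < n:
--         node = root
--         sym = None
--         while i < n:
--             node = node.children.get(encoded_data[i])
--             if node is None:
--                 break
--             i += 1
--             if node.symbol is not None:
--                 sym = node.symbol
--                 break
--         if sym is None:
--             raise ValueError("Invalid encoded data: incomplete code")
--         out.append(sym)
--     return ''.join(out)
-- ===== Notes on version B (the rewrite author's own statement) =====
-- stated objective: alternative
-- what changed: B builds a trie of the codewords once and decodes by walking one trie pointer per bit (nested token/bit loops), instead of A's single fold that regrows a current_code string and hashes it against the reversed code dict at every bit.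
import Mathlib
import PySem

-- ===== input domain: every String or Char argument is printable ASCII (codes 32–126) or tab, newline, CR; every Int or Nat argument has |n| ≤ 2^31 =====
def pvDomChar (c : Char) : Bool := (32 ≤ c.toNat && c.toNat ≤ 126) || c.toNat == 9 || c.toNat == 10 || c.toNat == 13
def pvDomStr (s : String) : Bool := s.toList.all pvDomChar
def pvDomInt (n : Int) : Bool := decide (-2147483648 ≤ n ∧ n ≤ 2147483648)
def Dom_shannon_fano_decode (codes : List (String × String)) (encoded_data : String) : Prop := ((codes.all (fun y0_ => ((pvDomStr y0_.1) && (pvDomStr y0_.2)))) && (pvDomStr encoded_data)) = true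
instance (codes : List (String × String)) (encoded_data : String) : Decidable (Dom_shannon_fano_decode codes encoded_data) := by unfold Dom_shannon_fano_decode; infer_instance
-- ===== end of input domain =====

-- B decodes with a codeword trie walked one pointer step per bit, instead of A's per-bit
-- regrowing of a current_code string hashed against the reversed dict (objective: alternative).

-- ===== PORT A =====
-- Literal port of A; strings are handled as their char lists (PySem convention), the dict
-- argument is normalised with PySem.Dict.ofList (Python dict construction: last value wins,
-- first position kept).  Where Python raises ValueError the port returns "" (outside Pre_).
def shannon_fano_decode (codes : List (String × String)) (encoded_data : String) : String :=
  let items := (PySem.Dict.ofList codes).items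
  -- reverse_codes = {code: symbol for symbol, code in codes.items()}
  let rev : PySem.Dict (List Char) String :=
    items.foldl (fun d p => d.insert p.2.toList p.1) PySem.Dict.empty
  -- for bit in encoded_data: current_code += bit; if current_code in reverse_codes: …
  let st := encoded_data.toList.foldl
    (fun (st : List String × List Char) bit =>
      match rev.get? (st.2 ++ [bit]) with
      | some sym => (st.1 ++ [sym], ([] : List Char))
      | none => (st.1, st.2 ++ [bit]))
    (([] : List String), ([] : List Char))
  if st.2 = [] then PySem.Str.join "" st.1
  else ""  -- raise ValueError("Invalid encoded data: incomplete code")  — excluded by Pre_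

-- ===== PORT B =====
-- B-side helpers: a trie over arbitrary chars; children as an explicit mutual list type.
mutual
inductive PVTrie where
  | node : Option String → PVChildren → PVTrie
inductive PVChildren where
  | nil : PVChildren
  | cons : Char → PVTrie → PVChildren → PVChildren
end

def pvChildGet : PVChildren → Char → Option PVTrie
  | .nil, _ => none
  | .cons c t rest, b => if b = c then some t else pvChildGet rest b

def pvChildSet : PVChildren → Char → PVTrie → PVChildren
  | .nil, b, t => .cons b t .nil
  | .cons c t' rest, b, t => if b = c then .cons c t rest else .cons c t' (pvChildSet rest b t)

def pvSymOf : PVTrie → Option String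
  | .node s _ => s

def pvChildrenOf : PVTrie → PVChildren
  | .node _ ch => ch

-- node = node.children.setdefault(ch, _Node()) … ; node.symbol = symbol
def pvInsert : PVTrie → List Char → String → PVTrie
  | .node _ ch, [], sym => .node (some sym) ch
  | .node s ch, b :: bs, sym =>
      .node s (pvChildSet ch b (pvInsert ((pvChildGet ch b).getD (.node none .nil)) bs sym))

def pvBuild (items : List (String × String)) : PVTrie :=
  items.foldl (fun t p => pvInsert t p.2.toList p.1) (.node none .nil)

-- the inner while loop: descend until a stored symbol is reached; none = dead end / ran out
def pvWalkTok : PVTrie → List Char → Option (String × List Char)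
  | _, [] => none
  | t, b :: bs =>
    match pvChildGet (pvChildrenOf t) b with
    | none => none
    | some t' =>
      match pvSymOf t' with
      | some s => some (s, bs)
      | none => pvWalkTok t' bs

-- termination lemma for the outer while loop (each token consumes at least one char)
theorem pvWalkTok_length : ∀ (t : PVTrie) (s : List Char) (sym : String) (r : List Char),
    pvWalkTok t s = some (sym, r) → r.length < s.length := by
  intro t s
  induction s generalizing t with
  | nil => intro sym r h; simp [pvWalkTok] at h
  | cons b bs ih =>
    intro sym r h
    simp only [pvWalkTok] at h
    cases hc : pvChildGet (pvChildrenOf t) b with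
    | none => simp only [hc] at h; simp at h
    | some t' =>
      simp only [hc] at h
      cases hs : pvSymOf t' with
      | some s' =>
        simp only [hs] at h; simp at h
        simp [← h.2, List.length_cons]
      | none =>
        simp only [hs] at h
        have := ih t' sym r h
        simpa [List.length_cons] using Nat.lt_succ_of_lt this

-- the outer while loop
def pvDecodeLoop (root : PVTrie) : List Char → Option (List String)
  | [] => some []
  | b :: bs =>
    match h : pvWalkTok root (b :: bs) with
    | none => none
    | some (sym, r) => (pvDecodeLoop root r).map (fun toks => sym :: toks)
  termination_by s => s.length
  decreasing_by exact pvWalkTok_length _ _ _ _ h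

-- Literal port of B (Source B).  Where Python raises ValueError the port returns "" (outside Pre_).
def shannon_fano_decode_alt (codes : List (String × String)) (encoded_data : String) : String :=
  let items := (PySem.Dict.ofList codes).items
  let root := pvBuild items
  match pvDecodeLoop root encoded_data.toList with
  | some toks => PySem.Str.join "" toks
  | none => ""  -- raise ValueError("Invalid encoded data: incomplete code")  — excluded by Pre_

-- ===== PRECONDITION & SPEC =====
-- Pre_-side helper: does the stream split greedily into complete codewords?  (tried = the
-- bits of the current, still incomplete codeword).  Decoding validity is inherently a
-- property of the whole stream; this single structural pass is its decision procedure.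
def pvParsesAux (rev : PySem.Dict (List Char) String) : List Char → List Char → Bool
  | tried, [] => decide (tried = [])
  | tried, b :: bs =>
    match rev.get? (tried ++ [b]) with
    | some _ => pvParsesAux rev [] bs
    | none => pvParsesAux rev (tried ++ [b]) bs

-- Pre_ holds exactly on the inputs where A returns normally: the encoded stream greedily
-- parses into complete codewords; on all other inputs A raises
-- ValueError("Invalid encoded data: incomplete code") (and B raises the same error).
def Pre_shannon_fano_decode (codes : List (String × String)) (encoded_data : String) : Prop :=
  pvParsesAux ((PySem.Dict.ofList codes).items.foldl
                 (fun d p => d.insert p.2.toList p.1) PySem.Dict.empty)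
              [] encoded_data.toList = true
instance (codes : List (String × String)) (encoded_data : String) : Decidable (Pre_shannon_fano_decode codes encoded_data) := by unfold Pre_shannon_fano_decode; infer_instance

def pvWitness_shannon_fano_decode : (List (String × String)) × String := ([("a", "0"), ("b", "10")], "0100")

def Spec_shannon_fano_decode (codes : List (String × String)) (encoded_data : String) (out : String) : Prop := out = shannon_fano_decode_alt codes encoded_data
instance (codes : List (String × String)) (encoded_data : String) (out : String) : Decidable (Spec_shannon_fano_decode codes encoded_data out) := by unfold Spec_shannon_fano_decode; infer_instance

-- ===== CLAIM (what is proved, stated in full; the proofs are below) =====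
def Claim_equal_shannon_fano_decode : Prop := ∀ (codes : List (String × String)) (encoded_data : String), Dom_shannon_fano_decode codes encoded_data → Pre_shannon_fano_decode codes encoded_data → Spec_shannon_fano_decode codes encoded_data (shannon_fano_decode codes encoded_data)

-- ===== LEMMAS AND PROOFS =====

-- greedy tokeniser (proof-only): the first codeword the greedy scan finds, and the rest
def pvScan (rev : PySem.Dict (List Char) String) : List Char → List Char → Option (List Char × String × List Char)
  | _, [] => none
  | tried, b :: bs =>
    match rev.get? (tried ++ [b]) with
    | some s => some (tried ++ [b], s, bs)
    | none => pvScan rev (tried ++ [b]) bs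

theorem pvScan_rest_length : ∀ (rev : PySem.Dict (List Char) String) (tried s : List Char)
    (p : List Char) (sym : String) (r : List Char),
    pvScan rev tried s = some (p, sym, r) → r.length < s.length := by
  intro rev tried s
  induction s generalizing tried with
  | nil => intro p sym r h; simp [pvScan] at h
  | cons b bs ih =>
    intro p sym r h
    simp only [pvScan] at h
    cases hg : rev.get? (tried ++ [b]) with
    | some s' => simp only [hg] at h; simp at h; simp [← h.2.2, List.length_cons]
    | none =>
      simp only [hg] at h
      have := ih (tried ++ [b]) p sym r h
      simpa [List.length_cons] using Nat.lt_succ_of_lt this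


-- navigation helpers (proof-only)
def pvNodeAt? : PVTrie → List Char → Option PVTrie
  | t, [] => some t
  | t, b :: bs =>
    match pvChildGet (pvChildrenOf t) b with
    | none => none
    | some t' => pvNodeAt? t' bs

def pvSymAt (t : PVTrie) (p : List Char) : Option String := (pvNodeAt? t p).bind pvSymOf

theorem pvChildGet_childSet : ∀ (ch : PVChildren) (b b' : Char) (t : PVTrie),
    pvChildGet (pvChildSet ch b t) b' = if b' = b then some t else pvChildGet ch b'
  | .nil, b, b', t => by
      simp [pvChildSet, pvChildGet]
  | .cons c t0 rest, b, b', t => by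
      by_cases hbc : b = c
      · subst hbc
        simp [pvChildSet, pvChildGet]
        by_cases h' : b' = b <;> simp [h']
      · simp only [pvChildSet, if_neg hbc, pvChildGet]
        by_cases h' : b' = c
        · subst h'; simp [Ne.symm hbc]
        · simp [h', pvChildGet_childSet rest b b' t]

theorem pvSymAt_empty (p : List Char) : pvSymAt (.node none .nil) p = none := by
  cases p with
  | nil => simp [pvSymAt, pvNodeAt?, pvSymOf]
  | cons b bs => simp [pvSymAt, pvNodeAt?, pvChildrenOf, pvChildGet]

theorem pvSymAt_insert (c : List Char) (t : PVTrie) (sym : String) (p : List Char) :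
    pvSymAt (pvInsert t c sym) p = if p = c then some sym else pvSymAt t p := by
  induction c generalizing t p with
  | nil =>
    obtain ⟨s, ch⟩ := t
    cases p with
    | nil => simp [pvInsert, pvSymAt, pvNodeAt?, pvSymOf]
    | cons b bs => simp [pvInsert, pvSymAt, pvNodeAt?, pvChildrenOf]
  | cons a as ih =>
    obtain ⟨s, ch⟩ := t
    cases p with
    | nil => simp [pvInsert, pvSymAt, pvNodeAt?, pvSymOf]
    | cons b bs =>
      simp only [pvInsert, pvSymAt, pvNodeAt?, pvChildrenOf, pvChildGet_childSet]
      by_cases hba : b = a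
      · subst hba
        simp only [if_true]
        have h1 : (pvNodeAt? (pvInsert ((pvChildGet ch b).getD (.node none .nil)) as sym) bs).bind pvSymOf
            = pvSymAt (pvInsert ((pvChildGet ch b).getD (.node none .nil)) as sym) bs := rfl
        rw [h1, ih]
        by_cases hbs : bs = as
        · subst hbs; simp
        · simp only [if_neg hbs]
          have hne : (b :: bs) ≠ (b :: as) := by simp [hbs]
          rw [if_neg hne]
          cases hg : pvChildGet ch b with
          | none =>
            simp [pvSymAt]
            intro a ha
            have h2 := pvSymAt_empty bs
            rw [pvSymAt, ha] at h2
            simpa using h2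
          | some t0 => simp [pvSymAt]
      · have hne : (b :: bs) ≠ (a :: as) := by simp [hba]
        simp [hba, hne]

theorem pvSymAt_build : ∀ (L : List (String × String)) (t : PVTrie)
    (d : PySem.Dict (List Char) String),
    (∀ p, pvSymAt t p = d.get? p) → ∀ p,
      pvSymAt (L.foldl (fun t q => pvInsert t q.2.toList q.1) t) p
        = (L.foldl (fun d q => d.insert q.2.toList q.1) d).get? p := by
  intro L
  induction L with
  | nil => intro t d h p; simpa using h p
  | cons q L ih =>
    intro t d h p
    simp only [List.foldl_cons]
    apply ih
    intro p'
    rw [pvSymAt_insert, PySem.Dict.get?_insert, h p']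

theorem pvNodeAt?_append (t : PVTrie) (p q : List Char) :
    pvNodeAt? t (p ++ q) = (pvNodeAt? t p).bind (fun t' => pvNodeAt? t' q) := by
  induction p generalizing t with
  | nil => simp [pvNodeAt?]
  | cons b bs ih =>
    simp only [List.cons_append, pvNodeAt?]
    cases pvChildGet (pvChildrenOf t) b with
    | none => simp
    | some t' => simp [ih]

-- specification of the greedy scanner: it finds the shortest matching codeword
theorem pvScan_spec : ∀ (rev : PySem.Dict (List Char) String) (s q p : List Char)
    (sym : String) (r : List Char), pvScan rev q s = some (p, sym, r) →
    ∃ mid, mid ≠ [] ∧ p = q ++ mid ∧ mid ++ r = s ∧ rev.get? p = some sym ∧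
      (∀ p', q <+: p' → p' <+: p → p' ≠ q → p' ≠ p → rev.get? p' = none) := by
  intro rev s
  induction s with
  | nil => intro q p sym r h; simp [pvScan] at h
  | cons b bs ih =>
    intro q p sym r h
    simp only [pvScan] at h
    cases hg : rev.get? (q ++ [b]) with
    | some s' =>
      simp only [hg] at h; simp at h
      obtain ⟨hp, hs, hr⟩ := h
      subst hp; subst hs; subst hr
      refine ⟨[b], by simp, rfl, by simp, hg, ?_⟩
      intro p' h1 h2 h3 h4
      exfalso
      have hl1 := h1.length_le
      have hl2 := h2.length_le
      simp only [List.length_append, List.length_cons, List.length_nil] at hl2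
      have hcase : p'.length = q.length ∨ p'.length = q.length + 1 := by omega
      cases hcase with
      | inl he => exact h3 (List.IsPrefix.eq_of_length h1 he.symm).symm
      | inr he => exact h4 (List.IsPrefix.eq_of_length h2 (by simp [he]))
    | none =>
      simp only [hg] at h
      obtain ⟨mid, hmid, hp, hmr, hgp, hmin⟩ := ih (q ++ [b]) p sym r h
      refine ⟨b :: mid, by simp, by simpa using hp, by simpa using hmr, hgp, ?_⟩
      intro p' h1 h2 h3 h4
      by_cases hpb : p' = q ++ [b]
      · rw [hpb]; exact hg
      · refine hmin p' ?_ h2 hpb h4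
        have hqb : (q ++ [b]) <+: p := by rw [hp]; exact ⟨mid, rfl⟩
        rcases List.prefix_or_prefix_of_prefix h2 hqb with hcase | hcase
        · exfalso
          have hl1 := h1.length_le
          have hl2 := hcase.length_le
          simp only [List.length_append, List.length_cons, List.length_nil] at hl2
          have hlen : p'.length = q.length ∨ p'.length = q.length + 1 := by omega
          cases hlen with
          | inl he => exact h3 (List.IsPrefix.eq_of_length h1 he.symm).symm
          | inr he => exact hpb (List.IsPrefix.eq_of_length hcase (by simp [he]))
        · exact hcase

-- A's loop consumes one greedy codeword: no proper prefix matches, the word itself does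
theorem pvFoldA_token (rev : PySem.Dict (List Char) String) (c : List Char) (sym : String)
    (hc : rev.get? c = some sym)
    (hmin : ∀ p', p' <+: c → p' ≠ [] → p' ≠ c → rev.get? p' = none) :
    ∀ (r q : List Char) (acc : List String), q ++ r = c → q ≠ c →
      List.foldl (fun (st : List String × List Char) bit =>
          match rev.get? (st.2 ++ [bit]) with
          | some sym => (st.1 ++ [sym], ([] : List Char))
          | none => (st.1, st.2 ++ [bit])) (acc, q) r
        = (acc ++ [sym], []) := by
  intro r
  induction r with
  | nil => intro q acc hq hne; simp at hq; exact absurd hq hne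
  | cons b bs ih =>
    intro q acc hq hne
    simp only [List.foldl_cons]
    by_cases hqb : q ++ [b] = c
    · have hbs : bs = [] := by
        have hlen := congrArg List.length (hq.trans hqb.symm)
        simp at hlen
        exact hlen
      subst hbs
      simp only [hqb, hc]
      simp
    · have hpre : (q ++ [b]) <+: c := ⟨bs, by simpa using hq⟩
      have hnone : rev.get? (q ++ [b]) = none := hmin _ hpre (by simp) hqb
      simp only [hnone]
      exact ih (q ++ [b]) acc (by simpa using hq) hqb

-- B's inner loop consumes the same codeword
theorem pvWalkTok_token (root : PVTrie) (c : List Char) (sym : String)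
    (hc : pvSymAt root c = some sym)
    (hmin : ∀ p', p' <+: c → p' ≠ [] → p' ≠ c → pvSymAt root p' = none) :
    ∀ (r q : List Char) (t : PVTrie) (rest : List Char), q ++ r = c → q ≠ c →
      pvNodeAt? root q = some t → pvWalkTok t (r ++ rest) = some (sym, rest) := by
  intro r
  induction r with
  | nil => intro q t rest hq hne; simp at hq; exact fun _ => absurd hq hne
  | cons b bs ih =>
    intro q t rest hq hne hnode
    have hqbpre : (q ++ [b]) <+: c := ⟨bs, by simpa using hq⟩
    obtain ⟨tail, htail⟩ := id hqbpre
    have hnodeC : (pvNodeAt? root c).isSome := by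
      cases hnc : pvNodeAt? root c with
      | none => rw [pvSymAt, hnc] at hc; simp at hc
      | some _ => simp
    have hnodeQB : ∃ t'', pvNodeAt? root (q ++ [b]) = some t'' := by
      rw [← htail, pvNodeAt?_append] at hnodeC
      cases hx : pvNodeAt? root (q ++ [b]) with
      | none => rw [hx] at hnodeC; simp at hnodeC
      | some t'' => exact ⟨t'', rfl⟩
    obtain ⟨t'', ht''⟩ := hnodeQB
    have hchild : pvChildGet (pvChildrenOf t) b = some t'' := by
      rw [pvNodeAt?_append, hnode] at ht''
      cases hx : pvChildGet (pvChildrenOf t) b with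
      | none => simp [pvNodeAt?, hx] at ht''
      | some u => simp [pvNodeAt?, hx] at ht''; rw [ht'']
    have hsym'' : pvSymOf t'' = pvSymAt root (q ++ [b]) := by
      rw [pvSymAt, ht'']; rfl
    simp only [List.cons_append, pvWalkTok, hchild]
    by_cases hqb : q ++ [b] = c
    · have hbs : bs = [] := by
        have hlen := congrArg List.length (hq.trans hqb.symm)
        simp at hlen
        exact hlen
      rw [hqb] at hsym''
      rw [hsym'', hc]
      subst hbs; simp
    · have : pvSymOf t'' = none := by rw [hsym'']; exact hmin _ hqbpre (by simp) hqb
      rw [this]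
      exact ih (q ++ [b]) t'' rest (by simpa using hq) hqb ht''

theorem pvDecodeLoop_cons (root : PVTrie) (b : Char) (bs : List Char) :
    pvDecodeLoop root (b :: bs)
      = match pvWalkTok root (b :: bs) with
        | none => none
        | some (sym, r) => (pvDecodeLoop root r).map (fun toks => sym :: toks) := by
  rw [pvDecodeLoop]
  split <;> simp_all

theorem pvParsesAux_scan (rev : PySem.Dict (List Char) String) :
    ∀ (s tried : List Char),
      pvParsesAux rev tried s
        = match pvScan rev tried s with
          | some (_, _, r) => pvParsesAux rev [] r
          | none => decide (s = [] ∧ tried = []) := by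
  intro s
  induction s with
  | nil => intro tried; simp [pvParsesAux, pvScan]
  | cons b bs ih =>
    intro tried
    simp only [pvParsesAux, pvScan]
    cases hg : rev.get? (tried ++ [b]) with
    | some s' => simp
    | none =>
      rw [ih (tried ++ [b])]
      cases hsc : pvScan rev (tried ++ [b]) bs with
      | some pr => simp
      | none => simp

-- main induction: on a greedily parseable stream, A's fold and B's loop produce the same tokens
theorem pvMain (L : List (String × String)) :
    ∀ (n : Nat) (s : List Char), s.length ≤ n →
    pvParsesAux (L.foldl (fun d q => d.insert q.2.toList q.1) PySem.Dict.empty) [] s = true →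
    ∃ toks,
      (∀ acc, List.foldl (fun (st : List String × List Char) bit =>
          match (L.foldl (fun d q => d.insert q.2.toList q.1) PySem.Dict.empty).get? (st.2 ++ [bit]) with
          | some sym => (st.1 ++ [sym], ([] : List Char))
          | none => (st.1, st.2 ++ [bit])) (acc, ([] : List Char)) s = (acc ++ toks, []))
      ∧ pvDecodeLoop (pvBuild L) s = some toks := by
  intro n
  set rev := L.foldl (fun d q => d.insert q.2.toList q.1) PySem.Dict.empty with hrev
  have hbridge : ∀ p, pvSymAt (pvBuild L) p = rev.get? p := by
    intro p
    exact pvSymAt_build L _ PySem.Dict.empty (fun p' => by simp [pvSymAt_empty, PySem.Dict.get?_empty]) p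
  induction n with
  | zero =>
    intro s hs hp
    have : s = [] := List.eq_nil_of_length_eq_zero (Nat.le_zero.mp hs)
    subst this
    exact ⟨[], fun acc => by simp, by simp [pvDecodeLoop]⟩
  | succ n ihn =>
    intro s hs hp
    cases s with
    | nil => exact ⟨[], fun acc => by simp, by simp [pvDecodeLoop]⟩
    | cons b bs =>
      rw [pvParsesAux_scan] at hp
      cases hscan : pvScan rev [] (b :: bs) with
      | none => rw [hscan] at hp; simp at hp
      | some pr =>
        obtain ⟨c, sym, r⟩ := pr
        rw [hscan] at hp
        simp only at hp
        obtain ⟨mid, hmid, hpmid, hmr, hgc, hminraw⟩ := pvScan_spec rev (b :: bs) [] c sym r hscan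
        simp at hpmid
        subst hpmid
        have hcs : c ++ r = b :: bs := hmr
        have hmin : ∀ p', p' <+: c → p' ≠ [] → p' ≠ c → rev.get? p' = none := by
          intro p' h1 h2 h3
          exact hminraw p' (by simp) h1 h2 h3
        have hrlen : r.length ≤ n := by
          have := pvScan_rest_length rev [] (b :: bs) c sym r hscan
          simp at this hs; omega
        obtain ⟨toks', hA', hB'⟩ := ihn r hrlen hp
        refine ⟨sym :: toks', ?_, ?_⟩
        · intro acc
          rw [← hcs, List.foldl_append]
          rw [pvFoldA_token rev c sym hgc hmin c [] acc (by simp) (by simpa using hmid.symm)]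
          rw [hA' (acc ++ [sym])]
          simp
        · rw [pvDecodeLoop_cons]
          have hwalk : pvWalkTok (pvBuild L) (b :: bs) = some (sym, r) := by
            rw [← hcs]
            exact pvWalkTok_token (pvBuild L) c sym (by rw [hbridge]; exact hgc)
              (fun p' h1 h2 h3 => by rw [hbridge]; exact hmin p' h1 h2 h3)
              c [] (pvBuild L) r (by simp) (by simpa using hmid.symm) rfl
          rw [hwalk]
          simp [hB']

-- ===== VERDICT (by name: the statement is the Claim_ definition above) =====
theorem shannon_fano_decode_spec : Claim_equal_shannon_fano_decode := by
  intro codes encoded_data _ hpre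
  unfold Spec_shannon_fano_decode
  unfold Pre_shannon_fano_decode at hpre
  unfold shannon_fano_decode shannon_fano_decode_alt
  dsimp only
  obtain ⟨toks, hA, hB⟩ :=
    pvMain (PySem.Dict.ofList codes).items encoded_data.toList.length encoded_data.toList
      (le_refl _) hpre
  rw [hA [], hB]
  simp
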